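-- pv_equiv track=rewrite | github.com/asmeurer/mypython | mypython/processors.py | replace_newlines_with_spaces
-- ===== SOURCE A (Python) =====
-- def replace_newlines_with_spaces(text, column_width):
--     lines = text.split('\n')
--     result = ''
--     for i, line in enumerate(lines):
--         line_length = len(line)
--         # Calculate padding to reach the next multiple of column_width
--         if not line:
--             padding = column_width
--         else:
--             padding = (column_width - (line_length % column_width)) % column_width
--         result += line
--         if i != len(lines) - 1:  # Avoid adding padding after the last line
--             result += ' ' * padding
--     return result
-- ===== SOURCE B (Python) =====
-- def replace_newlines_with_spaces(text, column_width):
--     out = []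
--     col = 0
--     for ch in text:
--         if ch == '\n':
--             pad = column_width if col == 0 else (column_width - col % column_width) % column_width
--             out.append(' ' * pad)
--             col = 0
--         else:
--             out.append(ch)
--             col += 1
--     return ''.join(out)
-- ===== Notes on version B (the rewrite author's own statement) =====
-- stated objective: alternative
-- what changed: Replaces A's split-into-lines pass with its enumerate loop and last-line index guard by a single character scan that keeps the current column and emits padding at each newline, joining the collected pieces once at the end; it trades A's line-list pass for per-character state.
-- outside the precondition, e.g. on replace_newlines_with_spaces('\n', 0): A returns '', B returns ''
import Mathlib
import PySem

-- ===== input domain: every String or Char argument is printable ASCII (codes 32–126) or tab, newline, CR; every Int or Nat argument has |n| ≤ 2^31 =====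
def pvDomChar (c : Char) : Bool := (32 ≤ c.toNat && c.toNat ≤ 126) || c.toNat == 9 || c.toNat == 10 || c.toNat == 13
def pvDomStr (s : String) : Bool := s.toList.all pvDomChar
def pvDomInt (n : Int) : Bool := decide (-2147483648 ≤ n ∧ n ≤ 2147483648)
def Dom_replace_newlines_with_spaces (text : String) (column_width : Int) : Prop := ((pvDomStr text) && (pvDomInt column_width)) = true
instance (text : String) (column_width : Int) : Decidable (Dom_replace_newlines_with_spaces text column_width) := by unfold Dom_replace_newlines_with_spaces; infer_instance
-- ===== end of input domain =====

-- B replaces A's split-into-lines pass (with its enumerate/last-line index guard) by a single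
-- character scan keeping the current column; same return value on Pre_ (column_width ≠ 0).

-- ===== PORT A =====
-- A's loop body (the code inside `for i, line in enumerate(lines)`), n = len(lines)
def pvFA (cw : Int) (n : Nat) (result : List Char) (il : Int × List Char) : List Char :=
  let i := il.1
  let line := il.2
  let line_length : Int := line.length
  let padding : Int :=
    if line.isEmpty then cw
    else PySem.Int.mod (cw - PySem.Int.mod line_length cw) cw
  let result := result ++ line
  if i ≠ (n : Int) - 1 then result ++ List.replicate padding.toNat ' ' else result

def replace_newlines_with_spaces (text : String) (column_width : Int) : String :=
  let lines := PySem.Chars.splitOn text.toList ['\n']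
  let n := lines.length
  String.ofList ((PySem.List.enumerate lines).foldl (pvFA column_width n) [])

-- ===== PORT B =====
-- B's loop body (the code inside `for ch in text`): state = (output chars, current column)
def pvStep (cw : Int) (st : List Char × Int) (ch : Char) : List Char × Int :=
  if ch = '\n' then
    let pad : Int :=
      if st.2 = 0 then cw
      else PySem.Int.mod (cw - PySem.Int.mod st.2 cw) cw
    (st.1 ++ List.replicate pad.toNat ' ', (0 : Int))
  else (st.1 ++ [ch], st.2 + 1)

def replace_newlines_with_spaces_alt (text : String) (column_width : Int) : String :=
  String.ofList ((text.toList.foldl (pvStep column_width) ([], 0)).1)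

-- ===== PRECONDITION & SPEC =====
-- Pre_ excludes column_width = 0, on which Python A raises ZeroDivisionError whenever any line
-- (including the last) is nonempty; on the remaining cw = 0 inputs (text made of newlines only)
-- A returns the text with its newlines deleted, which B also returns, but they are excluded with the rest.
def Pre_replace_newlines_with_spaces (text : String) (column_width : Int) : Prop :=
  column_width ≠ 0
instance (text : String) (column_width : Int) : Decidable (Pre_replace_newlines_with_spaces text column_width) := by
  unfold Pre_replace_newlines_with_spaces; infer_instance

def pvWitness_replace_newlines_with_spaces : String × Int := ("ab\ncd\n\nx", 4)

def Spec_replace_newlines_with_spaces (text : String) (column_width : Int) (out : String) : Prop :=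
  out = replace_newlines_with_spaces_alt text column_width
instance (text : String) (column_width : Int) (out : String) : Decidable (Spec_replace_newlines_with_spaces text column_width out) := by
  unfold Spec_replace_newlines_with_spaces; infer_instance

-- ===== CLAIM (what is proved, stated in full; the proofs are below) =====
def Claim_equal_replace_newlines_with_spaces : Prop := ∀ (text : String) (column_width : Int), Dom_replace_newlines_with_spaces text column_width → Pre_replace_newlines_with_spaces text column_width → Spec_replace_newlines_with_spaces text column_width (replace_newlines_with_spaces text column_width)

-- ===== LEMMAS AND PROOFS =====

-- the padding characters appended for a finished line of length m (both ports compute this)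
def pvPad (cw : Int) (m : Nat) : List Char :=
  List.replicate (if (m : Int) = 0 then cw
    else PySem.Int.mod (cw - PySem.Int.mod (m : Int) cw) cw).toNat ' '

def pvConsHead (p : List Char) : List (List Char) → List (List Char)
  | [] => [p]
  | x :: xs => (p ++ x) :: xs

-- reference split on '\n'
def pvSplit : List Char → List (List Char)
  | [] => [[]]
  | c :: r => if c = '\n' then [] :: pvSplit r else pvConsHead [c] (pvSplit r)

lemma pvSplit_ne_nil (l : List Char) : pvSplit l ≠ [] := by
  cases l with
  | nil => simp [pvSplit]
  | cons c r =>
    simp only [pvSplit]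
    split
    · simp
    · cases h : pvSplit r <;> simp [pvConsHead]

lemma pvSplit_cons' (l : List Char) : ∃ x xs, pvSplit l = x :: xs := by
  cases hps : pvSplit l with
  | nil => exact absurd hps (pvSplit_ne_nil l)
  | cons x xs => exact ⟨x, xs, rfl⟩

-- the merged output: k = columns already consumed of the first piece
def pvH (cw : Int) : Nat → List (List Char) → List Char
  | _, [] => []
  | _, [l] => l
  | k, l :: l' :: ls => l ++ pvPad cw (k + l.length) ++ pvH cw 0 (l' :: ls)

lemma pv_go_spec (fuel : Nat) : ∀ (l cur : List Char) (acc : List (List Char)), l.length ≤ fuel →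
    PySem.Chars.splitOn.go ['\n'] fuel l cur acc
      = acc.reverse ++ pvConsHead cur.reverse (pvSplit l) := by
  induction fuel with
  | zero =>
    intro l cur acc h
    have hl : l = [] := List.eq_nil_of_length_eq_zero (Nat.le_zero.mp h)
    subst hl
    simp [PySem.Chars.splitOn.go, pvSplit, pvConsHead]
  | succ f ih =>
    intro l cur acc h
    cases l with
    | nil => simp [PySem.Chars.splitOn.go, pvSplit, pvConsHead]
    | cons c rest =>
      have hrest : rest.length ≤ f := by simpa using h
      by_cases hc : c = '\n'
      · subst hc
        rw [show PySem.Chars.splitOn.go ['\n'] (f+1) ('\n' :: rest) cur acc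
              = PySem.Chars.splitOn.go ['\n'] f rest [] (cur.reverse :: acc) by
            simp [PySem.Chars.splitOn.go, List.isPrefixOf]]
        rw [ih rest [] (cur.reverse :: acc) hrest]
        obtain ⟨x, xs, hx⟩ := pvSplit_cons' rest
        simp [pvSplit, hx, pvConsHead]
      · rw [show PySem.Chars.splitOn.go ['\n'] (f+1) (c :: rest) cur acc
              = PySem.Chars.splitOn.go ['\n'] f rest (c :: cur) acc by
            simp [PySem.Chars.splitOn.go, List.isPrefixOf]
            exact fun h => absurd h.symm hc]
        rw [ih rest (c :: cur) acc hrest]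
        obtain ⟨x, xs, hx⟩ := pvSplit_cons' rest
        simp [pvSplit, hx, pvConsHead, hc]

lemma pv_splitOn_eq (l : List Char) : PySem.Chars.splitOn l ['\n'] = pvSplit l := by
  rw [PySem.Chars.splitOn, pv_go_spec (l.length + 1) l [] [] (Nat.le_succ _)]
  obtain ⟨x, xs, hx⟩ := pvSplit_cons' l
  simp [hx, pvConsHead]

lemma pvPad_eq_A (cw : Int) (line : List Char) :
    List.replicate (if line.isEmpty then cw
      else PySem.Int.mod (cw - PySem.Int.mod (line.length : Int) cw) cw).toNat ' '
      = pvPad cw line.length := by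
  by_cases h : line = [] <;> simp [pvPad, h, List.isEmpty_iff]

lemma pv_foldA (cw : Int) (n : Nat) :
    ∀ (ls : List (List Char)) (s : Nat) (acc : List Char), ls ≠ [] → s + ls.length = n →
      (PySem.List.enumerate ls (s : Int)).foldl (pvFA cw n) acc = acc ++ pvH cw 0 ls := by
  intro ls
  induction ls with
  | nil => intro s acc h; exact absurd rfl h
  | cons l t ih =>
    intro s acc _ hn
    cases t with
    | nil =>
      have hs : (s : Int) = (n : Int) - 1 := by simp at hn; omega
      simp [PySem.List.enumerate_cons, PySem.List.enumerate_nil, pvFA, pvH, hs]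
    | cons l' t' =>
      have hne : (s : Int) ≠ (n : Int) - 1 := by simp at hn; omega
      rw [PySem.List.enumerate_cons]
      simp only [List.foldl_cons]
      rw [show pvFA cw n acc ((s : Int), l)
            = acc ++ l ++ List.replicate (if l.isEmpty then cw
                else PySem.Int.mod (cw - PySem.Int.mod (l.length : Int) cw) cw).toNat ' ' by
          simp [pvFA, hne]]
      rw [pvPad_eq_A]
      rw [show ((s : Int) + 1) = ((s + 1 : Nat) : Int) by push_cast; ring]
      rw [ih (s + 1) _ (by simp) (by simp at hn ⊢; omega)]
      simp [pvH]

lemma pvStep_newline (cw : Int) (acc : List Char) (k : Nat) :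
    pvStep cw (acc, (k : Int)) '\n' = (acc ++ pvPad cw k, ((0 : Nat) : Int)) := by
  by_cases h : k = 0 <;> simp [pvStep, pvPad, h]

lemma pvStep_char (cw : Int) (acc : List Char) (k : Nat) (c : Char) (hc : c ≠ '\n') :
    pvStep cw (acc, (k : Int)) c = (acc ++ [c], ((k + 1 : Nat) : Int)) := by
  simp [pvStep, hc]

lemma pv_foldB (cw : Int) :
    ∀ (cs : List Char) (k : Nat) (acc : List Char),
      (cs.foldl (pvStep cw) (acc, (k : Int))).1 = acc ++ pvH cw k (pvSplit cs) := by
  intro cs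
  induction cs with
  | nil => intro k acc; simp [pvSplit, pvH]
  | cons c r ih =>
    intro k acc
    obtain ⟨x, xs, hx⟩ := pvSplit_cons' r
    by_cases hc : c = '\n'
    · subst hc
      simp only [List.foldl_cons]
      rw [pvStep_newline, ih 0 _]
      simp [pvSplit, hx, pvH]
    · simp only [List.foldl_cons]
      rw [pvStep_char cw acc k c hc, ih (k + 1) _]
      simp only [pvSplit, hc, if_false, hx, pvConsHead]
      cases xs with
      | nil => simp [pvH]
      | cons y ys =>
        simp only [pvH]
        rw [show k + 1 + x.length = k + (x.length + 1) by omega]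
        simp

lemma pv_portA (text : String) (cw : Int) :
    replace_newlines_with_spaces text cw = String.ofList (pvH cw 0 (pvSplit text.toList)) := by
  unfold replace_newlines_with_spaces
  simp only [pv_splitOn_eq]
  rw [show ((0 : Int)) = ((0 : Nat) : Int) from rfl]
  rw [pv_foldA cw (pvSplit text.toList).length (pvSplit text.toList) 0 []
        (pvSplit_ne_nil _) (by simp)]
  rfl

lemma pv_portB (text : String) (cw : Int) :
    replace_newlines_with_spaces_alt text cw = String.ofList (pvH cw 0 (pvSplit text.toList)) := by
  unfold replace_newlines_with_spaces_alt
  rw [show ((0 : Int)) = ((0 : Nat) : Int) from rfl]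
  rw [pv_foldB cw text.toList 0 []]
  rfl

-- ===== VERDICT (by name: the statement is the Claim_ definition above) =====
theorem replace_newlines_with_spaces_spec : Claim_equal_replace_newlines_with_spaces := by
  intro text cw _ _
  unfold Spec_replace_newlines_with_spaces
  rw [pv_portA, pv_portB]
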